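-- pv_equiv track=rewrite | github.com/Yoonsik-Shin/TIL | Algorism/BAEKJOON/Theme/day_by_day/2960.py | find
-- ===== SOURCE A (Python) =====
-- def find(n,k):
--     count = 0
--     nlist = [True for i in range(n + 1)]
--     for i in range(2,n+1):
--         for j in range(i, n+1, i):
--             if nlist[j] != True:
--                 continue
--             nlist[j] = False
--             count += 1
--             if count == k:
--                 return j
-- ===== SOURCE B (Python) =====
-- def find(n, k):
--     # The j-th number crossed out by the naive process is determined without any
--     # sieve state: a number x in [2, n] is crossed out during the pass of its
--     # smallest prime factor spf(x) (the first i that divides it), and each pass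
--     # crosses its survivors in increasing order.  So the whole crossing sequence
--     # is just [2..n] stably sorted by (spf(x), x); answer = its (k-1)-th entry.
--     def spf(x):
--         d = 2
--         while d * d <= x:
--             if x % d == 0:
--                 return d
--             d += 1
--         return x
--     seq = sorted(range(2, n + 1), key=lambda x: (spf(x), x))
--     return seq[k - 1] if 1 <= k <= len(seq) else None
-- ===== Notes on version B (the rewrite author's own statement) =====
-- stated objective: alternative
-- what changed: B keeps no sieve state at all: it computes each number's smallest prime factor directly by trial division and obtains the crossing sequence as [2..n] sorted by (spf(x), x), returning its (k-1)-th element, instead of A's mutable crossed-out array swept by nested marking loops.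
import Mathlib
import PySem

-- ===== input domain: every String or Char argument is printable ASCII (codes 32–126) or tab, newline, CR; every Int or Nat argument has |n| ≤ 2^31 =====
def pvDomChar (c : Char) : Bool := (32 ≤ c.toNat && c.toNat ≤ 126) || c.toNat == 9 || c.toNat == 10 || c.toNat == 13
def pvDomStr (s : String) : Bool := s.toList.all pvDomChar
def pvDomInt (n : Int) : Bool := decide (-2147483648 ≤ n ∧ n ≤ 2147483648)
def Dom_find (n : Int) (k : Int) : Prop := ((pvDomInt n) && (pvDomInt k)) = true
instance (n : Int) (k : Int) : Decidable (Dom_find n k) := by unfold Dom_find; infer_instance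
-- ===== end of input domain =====

-- B abandons A's mutable sieve: it derives the crossing sequence as [2..n] stably sorted by
-- (smallest prime factor, value) — spf computed per number by trial division — and indexes it;
-- objective: alternative (a state-free characterisation of the same sequence, not faster).


-- ===== PORT A =====
-- Every index nlist[j] read or written satisfies 2 ≤ j ≤ n < len(nlist), so
-- List.getD j.toNat / List.set j.toNat are exact for Python's nlist[j] here
-- (no negative, wrapping or out-of-range index ever occurs).
def findInner (k : Int) : List Int → List Bool → Int → Sum Int (List Bool × Int)
  | [], nlist, count => Sum.inr (nlist, count)
  | j :: js, nlist, count =>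
    if nlist.getD j.toNat true ≠ true then findInner k js nlist count
    else
      if count + 1 = k then Sum.inl j
      else findInner k js (nlist.set j.toNat false) (count + 1)

def findOuter (n k : Int) : List Int → List Bool → Int → Option Int
  | [], _, _ => none
  | i :: is, nlist, count =>
    match findInner k (PySem.List.pyRange i (n+1) i) nlist count with
    | Sum.inl j => some j
    | Sum.inr (nlist', count') => findOuter n k is nlist' count'

def find (n : Int) (k : Int) : Option Int :=
  findOuter n k (PySem.List.pyRange 2 (n+1) 1)
    ((PySem.List.pyRange 0 (n+1) 1).map (fun _ => true)) 0

-- ===== PORT B =====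
-- spf's while-loop condition 'd*d <= x' carries the extra conjunct '2 ≤ d' purely for
-- termination; it always holds in Source B (d starts at 2 and only increases).
def spfAux (x d : Int) : Int :=
  if h : 2 ≤ d ∧ d * d ≤ x then
    (if PySem.Int.mod x d = 0 then d else spfAux x (d + 1))
  else x
termination_by (x - d).toNat
decreasing_by
  have hdx : d < x := by nlinarith [h.1, h.2]
  omega

def spf (x : Int) : Int := spfAux x 2

def find_alt (n : Int) (k : Int) : Option Int :=
  let seq := PySem.List.sorted2 (PySem.List.pyRange 2 (n+1) 1) (fun x => spf x) (fun x => x)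
  if 1 ≤ k ∧ k ≤ PySem.List.len seq then PySem.List.pyGet? seq (k - 1) else none

-- ===== PRECONDITION & SPEC =====
def Spec_find (n : Int) (k : Int) (out : Option Int) : Prop := out = find_alt n k
instance (n : Int) (k : Int) (out : Option Int) : Decidable (Spec_find n k out) := by unfold Spec_find; infer_instance

-- ===== CLAIM (what is proved, stated in full; the proofs are below) =====
def Claim_equal_find : Prop := ∀ (n : Int) (k : Int), Dom_find n k → Spec_find n k (find n k)

-- ===== LEMMAS AND PROOFS =====

-- `crossedB i j` : some d with 2 ≤ d < i divides j (j is already crossed out before pass i).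
def crossedB (i j : Int) : Bool := (PySem.List.pyRange 2 i 1).any (fun d => PySem.Int.mod j d == 0)

theorem crossedB_iff (i j : Int) : crossedB i j = true ↔ ∃ d : Int, 2 ≤ d ∧ d < i ∧ d ∣ j := by
  unfold crossedB
  rw [List.any_eq_true]
  constructor
  · rintro ⟨d, hd, hdvd⟩
    rw [PySem.List.mem_pyRange_one] at hd
    refine ⟨d, hd.1, hd.2, ?_⟩
    rw [← PySem.Int.mod_eq_zero_iff_dvd]
    simpa using hdvd
  · rintro ⟨d, h1, h2, h3⟩
    refine ⟨d, ?_, ?_⟩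
    · rw [PySem.List.mem_pyRange_one]; exact ⟨h1, h2⟩
    · simpa using (PySem.Int.mod_eq_zero_iff_dvd j d).mpr h3

-- pass i's crossing group and the crossing sequence from pass i onwards
def grp (n i : Int) : List Int := (PySem.List.pyRange i (n+1) i).filter (fun j => !crossedB i j)

def tailCL (n i : Int) : List Int := (PySem.List.pyRange i (n+1) 1).flatMap (fun i' => grp n i')

theorem pyRange_nil_pos {a b s : Int} (hs : 0 < s) (hba : b ≤ a) : PySem.List.pyRange a b s = [] := by
  rw [PySem.List.pyRange_of_pos a b hs]
  simp [show ¬ a < b by omega]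

theorem pyRange_pairwise_pos {a b s : Int} (hs : 0 < s) :
    (PySem.List.pyRange a b s).Pairwise (· < ·) := by
  rw [PySem.List.pyRange_of_pos a b hs]
  refine List.Pairwise.map _ ?_ (List.pairwise_lt_range)
  intro x y hxy
  dsimp only
  have : (x : Int) < (y : Int) := by exact_mod_cast hxy
  nlinarith

theorem mem_rangeM {i n j : Int} (hi : 0 < i) :
    j ∈ PySem.List.pyRange i (n+1) i ↔ i ≤ j ∧ j ≤ n ∧ i ∣ j := by
  rw [PySem.List.mem_pyRange_iff_of_pos hi]
  have hdd : i ∣ j - i ↔ i ∣ j := by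
    constructor
    · intro h
      simpa using dvd_add h (dvd_refl i)
    · intro h
      exact dvd_sub h (dvd_refl i)
  rw [hdd]
  constructor <;> rintro ⟨a, b, c⟩ <;> exact ⟨a, by omega, c⟩

def setAll (js : List Int) (l : List Bool) : List Bool :=
  js.foldl (fun a j => a.set j.toNat false) l

theorem length_setAll (js : List Int) (l : List Bool) : (setAll js l).length = l.length := by
  induction js generalizing l with
  | nil => rfl
  | cons j js ih => rw [setAll, List.foldl_cons, ← setAll, ih, List.length_set]

theorem set_false_eq_self {l : List Bool} {x : Nat} (h : l.getD x true = false) :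
    l.set x false = l := by
  have hx : x < l.length := by
    by_contra hx
    rw [List.getD_eq_getElem?_getD, List.getElem?_eq_none (by omega)] at h
    simp at h
  apply List.ext_getElem?
  intro i
  rcases eq_or_ne i x with rfl | hne
  · rw [List.getElem?_set_self (by omega)]
    rw [List.getD_eq_getElem?_getD, List.getElem?_eq_getElem hx] at h
    simp at h
    simp [List.getElem?_eq_getElem hx, h]
  · rw [List.getElem?_set_ne (by omega)]

theorem getD_set_ne {l : List Bool} {x y : Nat} (h : y ≠ x) (b d : Bool) :
    (l.set y b).getD x d = l.getD x d := by
  rw [List.getD_eq_getElem?_getD, List.getD_eq_getElem?_getD, List.getElem?_set_ne h]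

theorem getD_setAll_of_not {js : List Int} {l : List Bool} {x : Nat}
    (h : ∀ j ∈ js, j.toNat ≠ x) (d : Bool) : (setAll js l).getD x d = l.getD x d := by
  induction js generalizing l with
  | nil => rfl
  | cons j js ih =>
    rw [setAll, List.foldl_cons, ← setAll, ih (fun j hj => h j (List.mem_cons_of_mem _ hj)),
      getD_set_ne (h j (List.mem_cons_self)) ]

theorem setAll_pres_false {js : List Int} {l : List Bool} {x : Nat}
    (h : l.getD x true = false) : (setAll js l).getD x true = false := by
  induction js generalizing l with
  | nil => exact h
  | cons j js ih =>
    rw [setAll, List.foldl_cons, ← setAll]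
    apply ih
    rcases eq_or_ne j.toNat x with rfl | hne
    · rw [set_false_eq_self h]; exact h
    · rw [getD_set_ne hne]; exact h

theorem getD_setAll_of_mem {js : List Int} {l : List Bool} {j : Int}
    (hj : j ∈ js) (hx : j.toNat < l.length) : (setAll js l).getD j.toNat true = false := by
  induction js generalizing l with
  | nil => simp at hj
  | cons j' js ih =>
    rw [setAll, List.foldl_cons, ← setAll]
    rcases List.mem_cons.mp hj with rfl | hmem
    · apply setAll_pres_false
      rw [List.getD_eq_getElem?_getD, List.getElem?_set_self hx]
      simp
    · exact ih hmem (by rw [List.length_set]; exact hx)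

def innerSpec (k : Int) (js : List Int) (l : List Bool) (c : Int) : Sum Int (List Bool × Int) :=
  if c < k ∧ k ≤ c + ((js.filter (fun j => l.getD j.toNat true)).length : Int)
  then Sum.inl ((js.filter (fun j => l.getD j.toNat true)).getD (k - c - 1).toNat 0)
  else Sum.inr (setAll js l, c + ((js.filter (fun j => l.getD j.toNat true)).length : Int))

theorem filter_set_ne {js : List Int} {j : Int} (hnn : ∀ x ∈ js, 0 ≤ x)
    (hgt : ∀ x ∈ js, j < x) (hj : 0 ≤ j) (l : List Bool) :
    js.filter (fun x => (l.set j.toNat false).getD x.toNat true)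
      = js.filter (fun x => l.getD x.toNat true) := by
  apply List.filter_congr
  intro x hx
  rw [getD_set_ne (by have := hnn x hx; have := hgt x hx; omega)]

theorem findInner_char (k : Int) (js : List Int) (l : List Bool) (c : Int)
    (hnn : ∀ j ∈ js, 0 ≤ j) (hsort : js.Pairwise (· < ·)) :
    findInner k js l c = innerSpec k js l c := by
  induction js generalizing l c with
  | nil =>
    rw [findInner, innerSpec, if_neg (by simp)]
    simp [setAll]
  | cons j js ih =>
    have hnn' : ∀ x ∈ js, 0 ≤ x := fun x hx => hnn x (List.mem_cons_of_mem _ hx)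
    have hgt : ∀ x ∈ js, j < x := fun x hx => (List.pairwise_cons.mp hsort).1 x hx
    have hsort' := (List.pairwise_cons.mp hsort).2
    have hj : 0 ≤ j := hnn j List.mem_cons_self
    by_cases hb : l.getD j.toNat true = true
    · rw [findInner, if_neg (by simpa using hb)]
      by_cases hk : c + 1 = k
      · rw [if_pos hk, innerSpec, List.filter_cons_of_pos (by simpa using hb)]
        have hidx : (k - c - 1).toNat = 0 := by omega
        rw [if_pos (And.intro (by omega) (by simp only [List.length_cons]; push_cast; omega)),
          hidx, List.getD_cons_zero]
      · rw [if_neg hk, ih _ _ hnn' hsort', innerSpec, innerSpec,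
          List.filter_cons_of_pos (by simpa using hb),
          filter_set_ne hnn' hgt hj]
        have hsa : setAll (j :: js) l = setAll js (l.set j.toNat false) := rfl
        by_cases hc : c + 1 < k ∧ k ≤ c + 1 + ((js.filter (fun x => l.getD x.toNat true)).length : Int)
        · rw [if_pos hc, if_pos (And.intro (by have := hc.1; omega) (by have := hc.2; simp only [List.length_cons]; push_cast; omega))]
          have hidx : (k - c - 1).toNat = (k - (c + 1) - 1).toNat + 1 := by have := hc.1; omega
          rw [hidx, List.getD_cons_succ]
        · rw [if_neg hc, if_neg (by simp only [List.length_cons]; push_cast; omega), hsa]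
          congr 2
          simp only [List.length_cons]
          push_cast
          ring
    · simp only [Bool.not_eq_true] at hb
      rw [findInner, if_pos (by simpa using hb), ih _ _ hnn' hsort', innerSpec, innerSpec,
        List.filter_cons_of_neg (by simpa using hb)]
      have hsa : setAll (j :: js) l = setAll js l := by
        show setAll js (l.set j.toNat false) = setAll js l
        rw [set_false_eq_self hb]
      rw [hsa]

-- A's outer loop, characterised: it returns the (k-c-1)-th element of the remaining
-- crossing sequence tailCL n i, when that index exists.
theorem outer_char (n k : Int) : ∀ (fuel : Nat) (i : Int), 2 ≤ i → (n + 1 - i).toNat ≤ fuel →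
    ∀ lA c, lA.length = (n+1).toNat →
    (∀ j : Int, i ≤ j → j ≤ n → (lA.getD j.toNat true = false ↔ crossedB i j = true)) →
    findOuter n k (PySem.List.pyRange i (n+1) 1) lA c =
      if c < k ∧ k ≤ c + ((tailCL n i).length : Int)
      then some ((tailCL n i).getD (k - c - 1).toNat 0) else none := by
  intro fuel
  induction fuel with
  | zero =>
    intro i h2 hf lA c _ _
    rw [pyRange_nil_pos one_pos (by omega), tailCL,
      pyRange_nil_pos one_pos (by omega)]
    rw [findOuter]
    simp only [List.flatMap_nil, List.length_nil, Nat.cast_zero, add_zero]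
    rw [if_neg (by omega)]
  | succ fuel ih =>
    intro i h2 hf lA c hlen hinv
    by_cases hin : i ≤ n
    case neg =>
      rw [pyRange_nil_pos one_pos (by omega), tailCL,
        pyRange_nil_pos one_pos (by omega)]
      rw [findOuter]
      simp only [List.flatMap_nil, List.length_nil, Nat.cast_zero, add_zero]
      rw [if_neg (by omega)]
    case pos =>
    have hi0 : (0:Int) < i := by omega
    have hsplit : tailCL n i = grp n i ++ tailCL n (i+1) := by
      rw [tailCL, PySem.List.pyRange_one_cons (by omega : i < n+1), List.flatMap_cons, tailCL]
    have hnnR : ∀ j ∈ PySem.List.pyRange i (n+1) i, 0 ≤ j := fun j hj => by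
      have := (mem_rangeM hi0).mp hj; omega
    have hfilt : (PySem.List.pyRange i (n+1) i).filter (fun j => lA.getD j.toNat true)
        = grp n i := by
      rw [grp]
      apply List.filter_congr
      intro j hj
      obtain ⟨h1, h2', _⟩ := (mem_rangeM hi0).mp hj
      by_cases hfa : lA.getD j.toNat true = false
      · rw [hfa, ((hinv j h1 h2').mp hfa)]
        rfl
      · have htr : lA.getD j.toNat true = true := by
          rcases Bool.eq_false_or_eq_true (lA.getD j.toNat true) with h | h
          · exact h
          · exact absurd h hfa
        have hnc : ¬ crossedB i j = true := fun hc => hfa ((hinv j h1 h2').mpr hc)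
        rw [htr]
        simp [hnc]
    rw [PySem.List.pyRange_one_cons (by omega : i < n+1), findOuter,
      findInner_char _ _ _ _ hnnR (pyRange_pairwise_pos hi0), innerSpec, hfilt]
    by_cases hc1 : c < k ∧ k ≤ c + ((grp n i).length : Int)
    · rw [if_pos hc1, hsplit, if_pos (And.intro hc1.1
        (by have := hc1.2; simp only [List.length_append]; push_cast; omega))]
      have hidx : (k - c - 1).toNat < (grp n i).length := by
        have h1 := hc1.1; have h2 := hc1.2; omega
      rw [List.getD_eq_getElem?_getD, List.getD_eq_getElem?_getD,
        List.getElem?_append_left hidx]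
    · rw [if_neg hc1]
      have hnew : ∀ j : Int, i + 1 ≤ j → j ≤ n →
          ((setAll (PySem.List.pyRange i (n+1) i) lA).getD j.toNat true = false
            ↔ crossedB (i+1) j = true) := by
        intro j hj1 hj2
        by_cases hdvd : i ∣ j
        · have hjR : j ∈ PySem.List.pyRange i (n+1) i :=
            (mem_rangeM hi0).mpr ⟨by omega, hj2, hdvd⟩
          have : (setAll (PySem.List.pyRange i (n+1) i) lA).getD j.toNat true = false :=
            getD_setAll_of_mem hjR (by rw [hlen]; omega)
          rw [this]
          simp only [true_iff]
          exact (crossedB_iff _ _).mpr ⟨i, h2, by omega, hdvd⟩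
        · have hne : ∀ x ∈ PySem.List.pyRange i (n+1) i, x.toNat ≠ j.toNat := by
            intro x hx hxx
            obtain ⟨hx1, _, hx3⟩ := (mem_rangeM hi0).mp hx
            have : x = j := by omega
            exact hdvd (this ▸ hx3)
          rw [getD_setAll_of_not hne, hinv j (by omega) hj2, crossedB_iff, crossedB_iff]
          constructor
          · rintro ⟨d, hd1, hd2, hd3⟩
            exact ⟨d, hd1, by omega, hd3⟩
          · rintro ⟨d, hd1, hd2, hd3⟩
            rcases eq_or_lt_of_le (show d ≤ i by omega) with rfl | hlt
            · exact absurd hd3 hdvd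
            · exact ⟨d, hd1, hlt, hd3⟩
      show findOuter n k (PySem.List.pyRange (i+1) (n+1) 1)
          (setAll (PySem.List.pyRange i (n+1) i) lA) (c + ((grp n i).length : Int)) = _
      rw [ih (i+1) (by omega) (by omega) _ _ (by rw [length_setAll]; exact hlen) hnew,
        hsplit]
      by_cases hc2 : c + ((grp n i).length : Int) < k ∧
          k ≤ c + ((grp n i).length : Int) + ((tailCL n (i+1)).length : Int)
      · rw [if_pos hc2, if_pos (And.intro (by have := hc2.1; omega)
          (by have := hc2.2; simp only [List.length_append]; push_cast; omega))]
        have hge : (grp n i).length ≤ (k - c - 1).toNat := by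
          have := hc2.1; omega
        rw [List.getD_eq_getElem?_getD, List.getD_eq_getElem?_getD,
          List.getElem?_append_right hge,
          show (k - c - 1).toNat - (grp n i).length
              = (k - (c + ((grp n i).length : Int)) - 1).toNat from by
            have := hc2.1
            omega]
      · have hgoal : ¬ (c < k ∧ k ≤ c + (((grp n i ++ tailCL n (i+1)).length : Nat) : Int)) := by
          rw [List.length_append]
          push_cast
          omega
        rw [if_neg hc2, if_neg hgoal]

-- smallest-prime-factor facts for B
theorem spfAux_spec (x : Int) (hx : 2 ≤ x) : ∀ (fuel : Nat) (d : Int), (x - d).toNat ≤ fuel →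
    2 ≤ d → (∀ e : Int, 2 ≤ e → e < d → ¬ e ∣ x) →
    spfAux x d ∣ x ∧ 2 ≤ spfAux x d ∧ spfAux x d ≤ x ∧
      ∀ e : Int, 2 ≤ e → e < spfAux x d → ¬ e ∣ x := by
  have hbig : ∀ d : Int, 2 ≤ d → ¬ d * d ≤ x → (∀ e : Int, 2 ≤ e → e < d → ¬ e ∣ x) →
      ∀ e : Int, 2 ≤ e → e < x → ¬ e ∣ x := by
    intro d hd hdx hnod e he1 he2 hedvd
    obtain ⟨f, hf⟩ := id hedvd
    have hxd : x < d * d := by omega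
    have hf1 : 0 < f := by
      by_contra hc
      have hf0 : f ≤ 0 := by omega
      nlinarith
    have hf2 : 2 ≤ f := by
      by_contra hc
      have hfo : f = 1 := by omega
      rw [hfo, mul_one] at hf
      omega
    by_cases hed : e < d
    · exact hnod e he1 hed hedvd
    · have hde : d ≤ e := by omega
      have hfe : f < e := by
        by_contra hc
        have hef : e ≤ f := by omega
        nlinarith [mul_le_mul hde hde (by omega : (0:Int) ≤ d) (by omega : (0:Int) ≤ e),
          mul_le_mul_of_nonneg_left hef (by omega : (0:Int) ≤ e)]
      have hfd : f < d := by
        by_contra hc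
        have hdf : d ≤ f := by omega
        nlinarith [mul_le_mul hdf hdf (by omega : (0:Int) ≤ d) (by omega : (0:Int) ≤ f),
          mul_lt_mul_of_pos_right hfe (by omega : (0:Int) < f)]
      exact hnod f hf2 hfd ⟨e, by rw [hf]; ring⟩
  intro fuel
  induction fuel with
  | zero =>
    intro d hfd hd hnod
    have hxd : x ≤ d := by omega
    have hdx : ¬ d * d ≤ x := by
      intro hdd
      nlinarith
    rw [spfAux, dif_neg (by tauto)]
    exact ⟨dvd_refl x, hx, le_refl x, hbig d hd hdx hnod⟩
  | succ fuel ih =>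
    intro d hfd hd hnod
    by_cases hcond : 2 ≤ d ∧ d * d ≤ x
    · rw [spfAux, dif_pos hcond]
      by_cases hdvd : PySem.Int.mod x d = 0
      · rw [if_pos hdvd]
        have hddx : d ∣ x := (PySem.Int.mod_eq_zero_iff_dvd x d).mp hdvd
        exact ⟨hddx, hd, by nlinarith [hcond.2], hnod⟩
      · rw [if_neg hdvd]
        have hdx : d < x := by nlinarith [hcond.2]
        refine ih (d+1) (by omega) (by omega) ?_
        intro e he1 he2
        rcases eq_or_lt_of_le (show e ≤ d by omega) with rfl | hlt
        · intro hed
          exact hdvd ((PySem.Int.mod_eq_zero_iff_dvd x e).mpr hed)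
        · exact hnod e he1 hlt
    · rw [spfAux, dif_neg hcond]
      have hdx : ¬ d * d ≤ x := by tauto
      exact ⟨dvd_refl x, hx, le_refl x, hbig d hd hdx hnod⟩

theorem spf_spec (x : Int) (hx : 2 ≤ x) :
    spf x ∣ x ∧ 2 ≤ spf x ∧ spf x ≤ x ∧ ∀ e : Int, 2 ≤ e → e < spf x → ¬ e ∣ x := by
  rw [spf]
  exact spfAux_spec x hx (x - 2).toNat 2 (by omega) (by omega) (fun e he1 he2 => by omega)

theorem spf_eq_of_grp {n i j : Int} (hi : 2 ≤ i) (hj : j ∈ grp n i) :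
    spf j = i ∧ i ≤ j ∧ j ≤ n := by
  rw [grp, List.mem_filter] at hj
  obtain ⟨hjr, hnb⟩ := hj
  obtain ⟨h1, h2, h3⟩ := (mem_rangeM (by omega)).mp hjr
  have hnc : ¬ crossedB i j = true := by simpa using hnb
  rw [crossedB_iff] at hnc
  push_neg at hnc
  obtain ⟨hdvd, hs2, hsle, hmin⟩ := spf_spec j (by omega)
  refine ⟨?_, h1, h2⟩
  by_cases hlt : spf j < i
  · exact absurd hdvd (hnc (spf j) hs2 hlt)
  · by_cases hgt : i < spf j
    · exact absurd h3 (hmin i hi hgt)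
    · omega

theorem mem_grp_spf {n j : Int} (h2 : 2 ≤ j) (hn : j ≤ n) : j ∈ grp n (spf j) := by
  obtain ⟨hdvd, hs2, hsle, hmin⟩ := spf_spec j h2
  rw [grp, List.mem_filter]
  constructor
  · exact (mem_rangeM (by omega)).mpr ⟨hsle, hn, hdvd⟩
  · simp only [Bool.not_eq_eq_eq_not, Bool.not_true]
    rw [← Bool.not_eq_true, crossedB_iff]
    push_neg
    intro d hd1 hd2
    exact hmin d hd1 hd2

-- the combined key: lexicographic (spf x, x) encoded into one integer on [2..n]
theorem tailCL_pairwise (n : Int) : ∀ (fuel : Nat) (i : Int), 2 ≤ i → (n + 1 - i).toNat ≤ fuel →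
    (tailCL n i).Pairwise (fun a b => spf a * (n+1) + a < spf b * (n+1) + b) := by
  intro fuel
  induction fuel with
  | zero =>
    intro i h2 hf
    rw [tailCL, pyRange_nil_pos one_pos (by omega)]
    exact List.Pairwise.nil
  | succ fuel ih =>
    intro i h2 hf
    by_cases hin : i ≤ n
    case neg =>
      rw [tailCL, pyRange_nil_pos one_pos (by omega)]
      exact List.Pairwise.nil
    case pos =>
    have hsplit : tailCL n i = grp n i ++ tailCL n (i+1) := by
      rw [tailCL, PySem.List.pyRange_one_cons (by omega : i < n+1), List.flatMap_cons, tailCL]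
    rw [hsplit, List.pairwise_append]
    refine ⟨?_, ih (i+1) (by omega) (by omega), ?_⟩
    · have hpw : (grp n i).Pairwise (· < ·) :=
        List.Pairwise.filter _ (pyRange_pairwise_pos (by omega))
      refine hpw.imp_of_mem ?_
      intro a b ha hb hab
      rw [(spf_eq_of_grp h2 ha).1, (spf_eq_of_grp h2 hb).1]
      omega
    · intro a ha b hb
      obtain ⟨hsa, ha1, ha2⟩ := spf_eq_of_grp h2 ha
      have hb' : ∃ i', i + 1 ≤ i' ∧ i' ≤ n ∧ b ∈ grp n i' := by
        rw [tailCL, List.mem_flatMap] at hb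
        obtain ⟨i', hi', hbg⟩ := hb
        rw [PySem.List.mem_pyRange_one] at hi'
        exact ⟨i', hi'.1, by omega, hbg⟩
      obtain ⟨i', hi1, hi2, hbg⟩ := hb'
      obtain ⟨hsb, hb1, hb2⟩ := spf_eq_of_grp (by omega) hbg
      rw [hsa, hsb]
      nlinarith

theorem mem_tailCL2 {n j : Int} : j ∈ tailCL n 2 ↔ 2 ≤ j ∧ j ≤ n := by
  rw [tailCL, List.mem_flatMap]
  constructor
  · rintro ⟨i, hi, hj⟩
    rw [PySem.List.mem_pyRange_one] at hi
    obtain ⟨_, h1, h2⟩ := spf_eq_of_grp hi.1 hj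
    exact ⟨by omega, h2⟩
  · rintro ⟨h1, h2⟩
    obtain ⟨_, hs2, hsle, _⟩ := spf_spec j h1
    exact ⟨spf j, PySem.List.mem_pyRange_one.mpr ⟨hs2, by omega⟩, mem_grp_spf h1 h2⟩

theorem insertBy_congr {α : Type} (b1 b2 : α → α → Bool) (x : α) :
    ∀ acc : List α, (∀ y ∈ acc, b1 x y = b2 x y) →
      PySem.List.insertBy b1 x acc = PySem.List.insertBy b2 x acc := by
  intro acc
  induction acc with
  | nil => intro _; rfl
  | cons y ys ih =>
    intro h
    rw [PySem.List.insertBy, PySem.List.insertBy, h y List.mem_cons_self]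
    split
    · rfl
    · rw [ih (fun z hz => h z (List.mem_cons_of_mem _ hz))]

theorem foldl_insertBy_congr {α : Type} (b1 b2 : α → α → Bool) (S : List α)
    (hb : ∀ x ∈ S, ∀ y ∈ S, b1 x y = b2 x y) :
    ∀ (xs acc : List α), (∀ x ∈ xs, x ∈ S) → (∀ y ∈ acc, y ∈ S) →
      xs.foldl (fun acc x => PySem.List.insertBy b1 x acc) acc
        = xs.foldl (fun acc x => PySem.List.insertBy b2 x acc) acc := by
  intro xs
  induction xs with
  | nil => intro acc _ _; rfl
  | cons x xs ih =>
    intro acc hxs hacc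
    have hxS : x ∈ S := hxs x List.mem_cons_self
    rw [List.foldl_cons, List.foldl_cons,
      insertBy_congr b1 b2 x acc (fun y hy => hb x hxS y (hacc y hy))]
    apply ih
    · exact fun z hz => hxs z (List.mem_cons_of_mem _ hz)
    · intro y hy
      rcases (PySem.List.mem_insertBy b2 x y acc).mp hy with rfl | hmem
      · exact hxS
      · exact hacc y hmem

theorem seq_eq_tailCL (n : Int) :
    PySem.List.sorted2 (PySem.List.pyRange 2 (n+1) 1) (fun x => spf x) (fun x => x)
      = tailCL n 2 := by
  have hS : ∀ x ∈ PySem.List.pyRange 2 (n+1) 1, 2 ≤ x ∧ x ≤ n := by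
    intro x hx
    rw [PySem.List.mem_pyRange_one] at hx
    omega
  have hstep : PySem.List.sorted2 (PySem.List.pyRange 2 (n+1) 1) (fun x => spf x) (fun x => x)
      = PySem.List.sorted (PySem.List.pyRange 2 (n+1) 1) (fun x => spf x * (n+1) + x) := by
    rw [PySem.List.sorted_eq_foldl_insertBy]
    show List.foldl _ [] _ = _
    apply foldl_insertBy_congr _ _ (PySem.List.pyRange 2 (n+1) 1)
      (fun x hx y hy => ?_) _ [] (fun x hx => hx) (by simp)
    obtain ⟨hx1, hx2⟩ := hS x hx
    obtain ⟨hy1, hy2⟩ := hS y hy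
    obtain ⟨_, hsx2, hsxle, _⟩ := spf_spec x hx1
    obtain ⟨_, hsy2, hsyle, _⟩ := spf_spec y hy1
    show (decide (spf x < spf y) || (!decide (spf y < spf x) && decide (x < y)))
        = decide (spf x * (n+1) + x < spf y * (n+1) + y)
    rw [Bool.eq_iff_iff]
    simp only [Bool.or_eq_true, Bool.and_eq_true, Bool.not_eq_eq_eq_not, Bool.not_true,
      decide_eq_true_eq, decide_eq_false_iff_not]
    constructor
    · rintro (h | ⟨h1, h2⟩)
      · nlinarith [mul_le_mul_of_nonneg_right (show spf x + 1 ≤ spf y by omega)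
          (show (0:Int) ≤ n + 1 by omega)]
      · have hle : spf x ≤ spf y := by omega
        nlinarith [mul_le_mul_of_nonneg_right hle (show (0:Int) ≤ n + 1 by omega)]
    · intro h
      rcases lt_trichotomy (spf x) (spf y) with hlt | heq | hgt
      · exact Or.inl hlt
      · refine Or.inr ⟨by omega, ?_⟩
        rw [heq] at h
        linarith
      · exfalso
        nlinarith [mul_le_mul_of_nonneg_right (show spf y + 1 ≤ spf x by omega)
          (show (0:Int) ≤ n + 1 by omega)]
  rw [hstep]
  apply PySem.List.sorted_eq_of_perm_of_pairwise_lt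
  · have hpw := tailCL_pairwise n (n + 1 - 2).toNat 2 (by omega) le_rfl
    have hnd1 : (tailCL n 2).Nodup :=
      List.Pairwise.imp (fun {a b} h => by intro he; rw [he] at h; omega) hpw
    have hnd2 : (PySem.List.pyRange 2 (n+1) 1).Nodup :=
      List.Pairwise.imp (fun {a b} h => by omega) (pyRange_pairwise_pos one_pos)
    rw [List.perm_ext_iff_of_nodup hnd1 hnd2]
    intro a
    rw [mem_tailCL2, PySem.List.mem_pyRange_one]
    omega
  · exact tailCL_pairwise n (n + 1 - 2).toNat 2 (by omega) le_rfl

theorem find_eq_alt (n k : Int) : find n k = find_alt n k := by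
  rw [find, find_alt]
  have hinit : ∀ j : Int, (2:Int) ≤ j → j ≤ n →
      (((PySem.List.pyRange 0 (n+1) 1).map (fun _ => true)).getD j.toNat true = false
        ↔ crossedB 2 j = true) := by
    intro j h1 h2
    constructor
    · intro h
      exfalso
      rw [List.getD_eq_getElem?_getD] at h
      rcases hE : ((PySem.List.pyRange 0 (n+1) 1).map (fun _ => true))[j.toNat]? with _ | b
      · rw [hE] at h; simp at h
      · obtain ⟨a, -, hab⟩ := List.mem_map.mp (List.mem_of_getElem? hE)
        have hb : b = true := by simpa using hab.symm
        rw [hE, hb] at h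
        simp at h
    · intro h
      rw [crossedB_iff] at h
      obtain ⟨d, hd1, hd2, _⟩ := h
      omega
  rw [outer_char n k (n + 1 - 2).toNat 2 (by omega) le_rfl _ 0
    (by rw [List.length_map, PySem.List.length_pyRange_one]; norm_num) hinit,
    seq_eq_tailCL, PySem.List.len_eq]
  by_cases hc : 1 ≤ k ∧ k ≤ ((tailCL n 2).length : Int)
  · rw [if_pos (by omega : 0 < k ∧ k ≤ 0 + ((tailCL n 2).length : Int)), if_pos hc,
      PySem.List.pyGet?_eq_some_getElem _ (by omega) (by have := hc.2; push_cast; omega)]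
    congr 1
    rw [List.getD_eq_getElem?_getD, show k - 0 - 1 = k - 1 by ring,
      List.getElem?_eq_getElem (by have := hc.2; have := hc.1; omega)]
    rfl
  · rw [if_neg (by omega), if_neg hc]

-- ===== VERDICT (by name: the statement is the Claim_ definition above) =====
theorem find_spec : Claim_equal_find := by
  intro n k _
  exact find_eq_alt n k
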